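-- pv_equiv track=rewrite | github.com/Idansss/Ghost-Bot | app/adapters/news_sources.py | _dedupe_stories
-- ===== SOURCE A (Python) =====
-- def _dedupe_stories(stories: list[dict]) -> list[dict]:
--     deduped: list[dict] = []
--     seen = set()
--     for story in sorted(stories, key=lambda x: x.get("published_at", ""), reverse=True):
--         url_key = (story.get("url") or "").strip().lower()
--         title_key = (story.get("title") or "").strip().lower()
--         key = url_key or title_key
--         if not key or key in seen:
--             continue
--         seen.add(key)
--         deduped.append(story)
--     return deduped
-- ===== SOURCE B (Python) =====
-- def _norm_key(story):
--     url_key = (story.get("url") or "").strip().lower()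
--     return url_key or (story.get("title") or "").strip().lower()
--
--
-- def _dedupe_stories(stories: list[dict]) -> list[dict]:
--     # One pass: per normalized key keep the story with the greatest published_at
--     # (ties -> smallest original index), then sort the representatives once.
--     best = {}
--     for i, story in enumerate(stories):
--         key = _norm_key(story)
--         if not key:
--             continue
--         cur = best.get(key)
--         if cur is None or story.get("published_at", "") > cur[1].get("published_at", ""):
--             best[key] = (i, story)
--     reps = sorted(best.values(), key=lambda t: t[0])
--     reps.sort(key=lambda t: t[1].get("published_at", ""), reverse=True)
--     return [story for _, story in reps]
-- ===== Notes on version B (the rewrite author's own statement) =====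
-- stated objective: alternative
-- what changed: A sorts all stories by date first and then scans the sorted list with a seen-set; B makes one dict-building pass over the raw list keeping, per normalized key, the story with the greatest published_at (ties to the first seen), and only then sorts the few representatives by index and stably by date descending.
import Mathlib
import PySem

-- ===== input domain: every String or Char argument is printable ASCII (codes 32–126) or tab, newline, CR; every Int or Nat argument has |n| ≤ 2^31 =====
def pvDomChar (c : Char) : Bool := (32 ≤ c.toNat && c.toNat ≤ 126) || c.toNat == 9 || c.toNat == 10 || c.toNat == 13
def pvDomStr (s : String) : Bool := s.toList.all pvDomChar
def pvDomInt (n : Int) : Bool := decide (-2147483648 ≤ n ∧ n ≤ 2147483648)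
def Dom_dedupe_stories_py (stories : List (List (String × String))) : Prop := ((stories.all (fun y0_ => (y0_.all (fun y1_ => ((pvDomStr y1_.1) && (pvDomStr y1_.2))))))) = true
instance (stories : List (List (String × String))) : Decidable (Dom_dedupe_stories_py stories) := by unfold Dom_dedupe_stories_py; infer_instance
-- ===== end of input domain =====

-- B replaces A's sort-everything-then-scan by one dict pass keeping the best story per
-- normalized key, then sorts only the representatives; return values proved equal.

-- shared field accessors (the normalizations both Pythons perform on each story)
def pvKeyOf (story : List (String × String)) : String :=
  let url_key := PySem.Str.lower (PySem.Str.strip (PySem.Dict.getD (PySem.Dict.mk story) "url" ""))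
  let title_key := PySem.Str.lower (PySem.Str.strip (PySem.Dict.getD (PySem.Dict.mk story) "title" ""))
  if url_key ≠ "" then url_key else title_key

def pvDateOf (story : List (String × String)) : String :=
  PySem.Dict.getD (PySem.Dict.mk story) "published_at" ""

-- ===== PORT A =====
def dedupe_stories_py (stories : List (List (String × String))) : List (List (String × String)) :=
  ((PySem.List.sorted stories (fun x => pvDateOf x) true).foldl
    (fun (st : List (List (String × String)) × PySem.Set String) story =>
      let key := pvKeyOf story
      if key = "" ∨ PySem.Set.contains st.2 key then st
      else (st.1 ++ [story], PySem.Set.add st.2 key))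
    ([], PySem.Set.empty)).1

-- ===== PORT B =====
def dedupe_stories_py_alt (stories : List (List (String × String))) : List (List (String × String)) :=
  let best := (PySem.List.enumerate stories).foldl
    (fun (best : PySem.Dict String (Int × List (String × String))) p =>
      let key := pvKeyOf p.2
      if key = "" then best
      else
        match best.get? key with
        | none => best.insert key p
        | some cur => if pvDateOf cur.2 < pvDateOf p.2 then best.insert key p else best)
    PySem.Dict.empty
  let reps := PySem.List.sorted best.values (fun t => t.1)
  let reps2 := PySem.List.sorted reps (fun t => pvDateOf t.2) true
  reps2.map (fun t => t.2)

-- ===== PRECONDITION & SPEC =====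
def Spec_dedupe_stories_py (stories : List (List (String × String))) (out : List (List (String × String))) : Prop := out = dedupe_stories_py_alt stories
instance (stories : List (List (String × String))) (out : List (List (String × String))) : Decidable (Spec_dedupe_stories_py stories out) := by unfold Spec_dedupe_stories_py; infer_instance

-- ===== CLAIM (what is proved, stated in full; the proofs are below) =====
def Claim_equal_dedupe_stories_py : Prop := ∀ (stories : List (List (String × String))), Dom_dedupe_stories_py stories → Spec_dedupe_stories_py stories (dedupe_stories_py stories)

-- ===== LEMMAS AND PROOFS =====

abbrev pvP : Type := Int × List (String × String)
def pvS (a b : pvP) : Prop :=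
  pvDateOf b.2 < pvDateOf a.2 ∨ (pvDateOf a.2 = pvDateOf b.2 ∧ a.1 < b.1)
def pvFOD : List pvP → PySem.Set String → List pvP
  | [], _ => []
  | p :: t, seen =>
    if pvKeyOf p.2 = "" ∨ PySem.Set.contains seen (pvKeyOf p.2) then pvFOD t seen
    else p :: pvFOD t (PySem.Set.add seen (pvKeyOf p.2))
def pvKeysNot : List pvP → PySem.Set String → List String
  | [], _ => []
  | p :: t, seen =>
    if pvKeyOf p.2 = "" ∨ PySem.Set.contains seen (pvKeyOf p.2) then pvKeysNot t seen
    else pvKeyOf p.2 :: pvKeysNot t (PySem.Set.add seen (pvKeyOf p.2))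

lemma pvKeysNot_cons (p : pvP) (t : List pvP) (seen : PySem.Set String) :
    pvKeysNot (p :: t) seen =
      if pvKeyOf p.2 = "" ∨ PySem.Set.contains seen (pvKeyOf p.2) then pvKeysNot t seen
      else pvKeyOf p.2 :: pvKeysNot t (PySem.Set.add seen (pvKeyOf p.2)) := rfl

lemma pvFOD_cons (p : pvP) (t : List pvP) (seen : PySem.Set String) :
    pvFOD (p :: t) seen =
      if pvKeyOf p.2 = "" ∨ PySem.Set.contains seen (pvKeyOf p.2) then pvFOD t seen
      else p :: pvFOD t (PySem.Set.add seen (pvKeyOf p.2)) := rfl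

lemma pv_contains_iff (s : PySem.Set String) (k : String) :
    PySem.Set.contains s k = true ↔ k ∈ s := by
  simp [PySem.Set.contains]

lemma pv_mem_keysNot (l : List pvP) (seen : PySem.Set String) (k : String) :
    k ∈ pvKeysNot l seen ↔ (k ≠ "" ∧ k ∉ seen ∧ ∃ p ∈ l, pvKeyOf p.2 = k) := by
  induction l generalizing seen with
  | nil => simp [pvKeysNot]
  | cons p t ih =>
    rw [pvKeysNot_cons]
    by_cases h : pvKeyOf p.2 = "" ∨ PySem.Set.contains seen (pvKeyOf p.2)
    · rw [if_pos h, ih]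
      constructor
      · rintro ⟨h1, h2, q, hq, hq'⟩
        exact ⟨h1, h2, q, List.mem_cons_of_mem _ hq, hq'⟩
      · rintro ⟨h1, h2, q, hq, hq'⟩
        rcases List.mem_cons.mp hq with hq0 | hq0
        · rcases h with h | h
          · exact absurd ((hq0 ▸ hq') ▸ h) h1
          · exact absurd ((hq0 ▸ hq') ▸ (pv_contains_iff _ _).mp h) h2
        · exact ⟨h1, h2, q, hq0, hq'⟩
    · have h1 : pvKeyOf p.2 ≠ "" := fun he => h (Or.inl he)
      have h2 : pvKeyOf p.2 ∉ seen := fun hm => h (Or.inr ((pv_contains_iff _ _).mpr hm))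
      rw [if_neg h]
      rw [List.mem_cons, ih]
      constructor
      · rintro (heq | ⟨g1, g2, q, hq, hq'⟩)
        · exact ⟨by rw [heq]; exact h1, by rw [heq]; exact h2, p, List.mem_cons_self, heq.symm⟩
        · rw [PySem.Set.mem_add] at g2
          exact ⟨g1, fun hm => g2 (Or.inl hm), q, List.mem_cons_of_mem _ hq, hq'⟩
      · rintro ⟨g1, g2, q, hq, hq'⟩
        rcases List.mem_cons.mp hq with hq0 | hq0
        · exact Or.inl (hq0 ▸ hq').symm
        · by_cases hk : k = pvKeyOf p.2
          · exact Or.inl hk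
          · refine Or.inr ⟨g1, ?_, q, hq0, hq'⟩
            rw [PySem.Set.mem_add]
            rintro (hm | hm)
            · exact g2 hm
            · exact hk hm

lemma pv_nodup_keysNot (l : List pvP) (seen : PySem.Set String) :
    (pvKeysNot l seen).Nodup := by
  induction l generalizing seen with
  | nil => simp [pvKeysNot]
  | cons p t ih =>
    rw [pvKeysNot_cons]
    by_cases h : pvKeyOf p.2 = "" ∨ PySem.Set.contains seen (pvKeyOf p.2)
    · rw [if_pos h]; exact ih seen
    · rw [if_neg h]
      refine List.nodup_cons.mpr ⟨?_, ih _⟩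
      intro hmem
      rcases (pv_mem_keysNot _ _ _).mp hmem with ⟨_, h2, _⟩
      exact h2 ((PySem.Set.mem_add _ _ _).mpr (Or.inr rfl))

lemma pvS_asymm {a b : pvP} (h1 : pvS a b) (h2 : pvS b a) : False := by
  rcases h1 with h1 | ⟨h1, h1'⟩ <;> rcases h2 with h2 | ⟨h2, h2'⟩
  · exact absurd h2 (lt_asymm h1)
  · exact absurd h1 (by rw [h2]; exact lt_irrefl _)
  · exact absurd h2 (by rw [h1]; exact lt_irrefl _)
  · omega


lemma pv_insertBy_pairwise {α κ : Type} [LinearOrder κ] (key : α → κ) (T : α → α → Prop)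
    (x : α) (acc : List α)
    (hacc : acc.Pairwise (fun a b => key b < key a ∨ (key a = key b ∧ T a b)))
    (hx : ∀ y ∈ acc, T y x) :
    (PySem.List.insertBy (fun a b => decide (key b < key a)) x acc).Pairwise
      (fun a b => key b < key a ∨ (key a = key b ∧ T a b)) := by
  induction acc with
  | nil => simp [PySem.List.insertBy]
  | cons y ys ih =>
    rcases List.pairwise_cons.mp hacc with ⟨hy, hys⟩
    by_cases h : key y < key x
    · rw [show PySem.List.insertBy (fun a b => decide (key b < key a)) x (y :: ys)
          = x :: y :: ys by simp [PySem.List.insertBy, h]]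
      refine List.pairwise_cons.mpr ⟨?_, hacc⟩
      intro z hz
      rcases List.mem_cons.mp hz with rfl | hz
      · exact Or.inl h
      · rcases hy z hz with h2 | ⟨h2, _⟩
        · exact Or.inl (lt_trans h2 h)
        · exact Or.inl (h2 ▸ h)
    · rw [show PySem.List.insertBy (fun a b => decide (key b < key a)) x (y :: ys)
          = y :: PySem.List.insertBy (fun a b => decide (key b < key a)) x ys by
            simp [PySem.List.insertBy, h]]
      refine List.pairwise_cons.mpr ⟨?_, ih hys (fun z hz => hx z (List.mem_cons_of_mem _ hz))⟩
      intro z hz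
      rcases (PySem.List.mem_insertBy _ _ _ _).mp hz with rfl | hz
      · rcases lt_or_eq_of_le (not_lt.mp h) with h2 | h2
        · exact Or.inl h2
        · exact Or.inr ⟨h2.symm, hx y (List.mem_cons_self)⟩
      · exact hy z hz

lemma pv_foldl_insertBy_pairwise {α κ : Type} [LinearOrder κ] (key : α → κ) (T : α → α → Prop)
    (xs acc : List α)
    (hacc : acc.Pairwise (fun a b => key b < key a ∨ (key a = key b ∧ T a b)))
    (hcross : ∀ y ∈ acc, ∀ x ∈ xs, T y x)
    (hxs : xs.Pairwise T) :
    (xs.foldl (fun acc x => PySem.List.insertBy (fun a b => decide (key b < key a)) x acc) acc).Pairwise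
      (fun a b => key b < key a ∨ (key a = key b ∧ T a b)) := by
  induction xs generalizing acc with
  | nil => simpa using hacc
  | cons x xs ih =>
    rcases List.pairwise_cons.mp hxs with ⟨hxxs, hxs'⟩
    simp only [List.foldl_cons]
    refine ih _ ?_ ?_ hxs'
    · exact pv_insertBy_pairwise key T x acc hacc (fun y hy => hcross y hy x List.mem_cons_self)
    · intro y hy z hz
      rcases (PySem.List.mem_insertBy _ _ _ _).mp hy with rfl | hy
      · exact hxxs z hz
      · exact hcross y hy z (List.mem_cons_of_mem _ hz)

lemma pv_sorted_rev_pairwise {α κ : Type} [LinearOrder κ] (key : α → κ) (T : α → α → Prop)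
    (xs : List α) (hxs : xs.Pairwise T) :
    (PySem.List.sorted xs key true).Pairwise
      (fun a b => key b < key a ∨ (key a = key b ∧ T a b)) := by
  rw [PySem.List.sorted_rev_eq_foldl_insertBy]
  exact pv_foldl_insertBy_pairwise key T xs [] (by simp) (by simp) hxs

lemma pv_map_insertBy {α β : Type} (f : α → β) (bef : β → β → Bool) (x : α) (acc : List α) :
    (PySem.List.insertBy (fun a b => bef (f a) (f b)) x acc).map f
      = PySem.List.insertBy bef (f x) (acc.map f) := by
  induction acc with
  | nil => simp [PySem.List.insertBy]
  | cons y ys ih =>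
    by_cases h : bef (f x) (f y)
    · simp [PySem.List.insertBy, h]
    · simp [PySem.List.insertBy, h, ih]

lemma pv_map_sorted_rev {α β κ : Type} [LT κ] [DecidableLT κ] (f : α → β) (key : β → κ)
    (xs : List α) :
    (PySem.List.sorted xs (fun a => key (f a)) true).map f
      = PySem.List.sorted (xs.map f) key true := by
  rw [PySem.List.sorted_rev_eq_foldl_insertBy, PySem.List.sorted_rev_eq_foldl_insertBy]
  suffices h : ∀ (acc : List α),
      (xs.foldl (fun acc x => PySem.List.insertBy (fun a b => decide (key (f b) < key (f a))) x acc) acc).map f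
        = (xs.map f).foldl (fun acc x => PySem.List.insertBy (fun a b => decide (key b < key a)) x acc) (acc.map f) by
    simpa using h []
  induction xs with
  | nil => intro acc; simp
  | cons x xs ih =>
    intro acc
    simp only [List.foldl_cons, List.map_cons]
    rw [ih, pv_map_insertBy f (fun a b => decide (key b < key a)) x acc]

def pvStep (k : String) (acc : Option pvP) (p : pvP) : Option pvP :=
  if pvKeyOf p.2 = k then
    match acc with
    | none => some p
    | some c => if pvDateOf c.2 < pvDateOf p.2 then some p else some c
  else acc
def pvRep (l : List pvP) (k : String) : Option pvP := l.foldl (pvStep k) none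
def pvPick (l : List pvP) (k : String) : pvP := (pvRep l k).getD (0, [])
def pvIsBest (l : List pvP) (k : String) (p : pvP) : Prop :=
  p ∈ l ∧ pvKeyOf p.2 = k ∧ ∀ q ∈ l, pvKeyOf q.2 = k → q = p ∨ pvS p q

lemma pvRep_cons_ne {p : pvP} {k : String} (t : List pvP) (h : pvKeyOf p.2 ≠ k) :
    pvRep (p :: t) k = pvRep t k := by
  simp only [pvRep, List.foldl_cons, pvStep, if_neg h]

lemma pvRep_cons_eq {p : pvP} {k : String} (t : List pvP) (h : pvKeyOf p.2 = k) :
    pvRep (p :: t) k = t.foldl (pvStep k) (some p) := by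
  simp only [pvRep, List.foldl_cons, pvStep, if_pos h]

lemma pvRep_append (l : List pvP) (p : pvP) (k : String) :
    pvRep (l ++ [p]) k = pvStep k (pvRep l k) p := by
  simp only [pvRep, List.foldl_append, List.foldl_cons, List.foldl_nil]

lemma pv_foldl_some (t : List pvP) (k : String) (c : pvP) :
    ∃ c', t.foldl (pvStep k) (some c) = some c' := by
  induction t generalizing c with
  | nil => exact ⟨c, rfl⟩
  | cons q t ih =>
    rw [List.foldl_cons]
    by_cases h : pvKeyOf q.2 = k
    · by_cases h2 : pvDateOf c.2 < pvDateOf q.2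
      · rw [show pvStep k (some c) q = some q by simp only [pvStep, if_pos h, if_pos h2]]
        exact ih q
      · rw [show pvStep k (some c) q = some c by simp only [pvStep, if_pos h, if_neg h2]]
        exact ih c
    · rw [show pvStep k (some c) q = some c by simp only [pvStep, if_neg h]]
      exact ih c

lemma pv_foldl_keep (t : List pvP) (k : String) (c : pvP)
    (h : ∀ q ∈ t, pvKeyOf q.2 = k → ¬ pvDateOf c.2 < pvDateOf q.2) :
    t.foldl (pvStep k) (some c) = some c := by
  induction t with
  | nil => rfl
  | cons q t ih =>
    rw [List.foldl_cons]
    by_cases hk : pvKeyOf q.2 = k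
    · rw [show pvStep k (some c) q = some c by
        simp only [pvStep, if_pos hk, if_neg (h q List.mem_cons_self hk)]]
      exact ih (fun z hz => h z (List.mem_cons_of_mem _ hz))
    · rw [show pvStep k (some c) q = some c by simp only [pvStep, if_neg hk]]
      exact ih (fun z hz => h z (List.mem_cons_of_mem _ hz))

lemma pvRep_eq_none_iff (l : List pvP) (k : String) :
    pvRep l k = none ↔ ∀ q ∈ l, pvKeyOf q.2 ≠ k := by
  induction l with
  | nil => simp [pvRep]
  | cons p t ih =>
    by_cases h : pvKeyOf p.2 = k
    · rw [pvRep_cons_eq t h]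
      rcases pv_foldl_some t k p with ⟨c', hc⟩
      rw [hc]
      simp only [reduceCtorEq, false_iff]
      intro hall
      exact hall p List.mem_cons_self h
    · rw [pvRep_cons_ne t h, ih]
      constructor
      · intro hall q hq
        rcases List.mem_cons.mp hq with hq0 | hq0
        · intro he; exact h (hq0 ▸ he)
        · exact hall q hq0
      · intro hall q hq; exact hall q (List.mem_cons_of_mem _ hq)

lemma pvIsBest_unique {l : List pvP} {k : String} {p p' : pvP}
    (h : pvIsBest l k p) (h' : pvIsBest l k p') : p = p' := by
  rcases h with ⟨hm, hk, hall⟩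
  rcases h' with ⟨hm', hk', hall'⟩
  rcases hall p' hm' hk' with h1 | h1
  · exact h1.symm
  · rcases hall' p hm hk with h2 | h2
    · exact h2
    · exact absurd h1 (fun hS => pvS_asymm hS h2)

lemma pvIsBest_perm {l l' : List pvP} {k : String} {p : pvP}
    (h : pvIsBest l k p) (hp : l.Perm l') : pvIsBest l' k p :=
  ⟨hp.mem_iff.mp h.1, h.2.1, fun q hq => h.2.2 q (hp.mem_iff.mpr hq)⟩

lemma pvRep_isBest {l : List pvP} {k : String} {p : pvP} (T : pvP → pvP → Prop)
    (HT : ∀ a b : pvP, T a b → pvDateOf a.2 = pvDateOf b.2 → a.1 < b.1)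
    (hl : l.Pairwise T) (h : pvRep l k = some p) : pvIsBest l k p := by
  induction l using List.reverseRecOn generalizing p with
  | nil => simp [pvRep] at h
  | append_singleton l q ih =>
    rw [pvRep_append] at h
    have hpw := (List.pairwise_append.mp hl)
    have hTq : ∀ y ∈ l, T y q := fun y hy => hpw.2.2 y hy q List.mem_cons_self
    cases hrep : pvRep l k with
    | none =>
      rw [hrep] at h
      have hempty := (pvRep_eq_none_iff l k).mp hrep
      by_cases hk : pvKeyOf q.2 = k
      · rw [show pvStep k none q = some q by simp only [pvStep, if_pos hk]] at h
        have hpq : p = q := (Option.some.inj h).symm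
        refine ⟨by rw [hpq]; exact List.mem_append_right _ List.mem_cons_self, by rw [hpq]; exact hk, ?_⟩
        intro z hz hzk
        rcases List.mem_append.mp hz with hz0 | hz0
        · exact absurd hzk (hempty z hz0)
        · exact Or.inl ((List.mem_singleton.mp hz0).trans hpq.symm)
      · rw [show pvStep k none q = none by simp only [pvStep, if_neg hk]] at h
        exact absurd h (by simp)
    | some c =>
      rw [hrep] at h
      have hbest : pvIsBest l k c := by exact ih hpw.1 hrep
      by_cases hk : pvKeyOf q.2 = k
      · by_cases hd : pvDateOf c.2 < pvDateOf q.2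
        · rw [show pvStep k (some c) q = some q by simp only [pvStep, if_pos hk, if_pos hd]] at h
          have hpq : p = q := (Option.some.inj h).symm
          refine ⟨by rw [hpq]; exact List.mem_append_right _ List.mem_cons_self, by rw [hpq]; exact hk, ?_⟩
          intro z hz hzk
          rcases List.mem_append.mp hz with hz0 | hz0
          · refine Or.inr ?_
            rw [hpq]
            rcases hbest.2.2 z hz0 hzk with hz1 | hz1
            · exact Or.inl (by rw [hz1]; exact hd)
            · rcases hz1 with hz1 | ⟨hz1, _⟩
              · exact Or.inl (lt_trans hz1 hd)
              · exact Or.inl (hz1 ▸ hd)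
          · exact Or.inl ((List.mem_singleton.mp hz0).trans hpq.symm)
        · rw [show pvStep k (some c) q = some c by simp only [pvStep, if_pos hk, if_neg hd]] at h
          have hpc : p = c := (Option.some.inj h).symm
          refine ⟨by rw [hpc]; exact List.mem_append_left _ hbest.1, by rw [hpc]; exact hbest.2.1, ?_⟩
          intro z hz hzk
          rcases List.mem_append.mp hz with hz0 | hz0
          · rcases hbest.2.2 z hz0 hzk with hz1 | hz1
            · exact Or.inl (by rw [hpc, hz1])
            · exact Or.inr (hpc ▸ hz1)
          · have hz1 := List.mem_singleton.mp hz0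
            rw [hz1, hpc]
            rcases lt_or_eq_of_le (not_lt.mp hd) with hd2 | hd2
            · exact Or.inr (Or.inl hd2)
            · exact Or.inr (Or.inr ⟨hd2.symm, HT c q (hTq c hbest.1) hd2.symm⟩)
      · rw [show pvStep k (some c) q = some c by simp only [pvStep, if_neg hk]] at h
        have hpc : p = c := (Option.some.inj h).symm
        refine ⟨by rw [hpc]; exact List.mem_append_left _ hbest.1, by rw [hpc]; exact hbest.2.1, ?_⟩
        intro z hz hzk
        rcases List.mem_append.mp hz with hz0 | hz0
        · rcases hbest.2.2 z hz0 hzk with hz1 | hz1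
          · exact Or.inl (by rw [hpc, hz1])
          · exact Or.inr (hpc ▸ hz1)
        · exact absurd ((List.mem_singleton.mp hz0) ▸ hzk) hk

lemma pv_FOD_eq (l : List pvP) (hl : l.Pairwise pvS) (seen : PySem.Set String) :
    pvFOD l seen = (pvKeysNot l seen).map (pvPick l) := by
  induction l generalizing seen with
  | nil => simp [pvFOD, pvKeysNot]
  | cons p t ih =>
    rcases List.pairwise_cons.mp hl with ⟨hp, ht⟩
    rw [pvFOD_cons, pvKeysNot_cons]
    by_cases h : pvKeyOf p.2 = "" ∨ PySem.Set.contains seen (pvKeyOf p.2)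
    · rw [if_pos h, if_pos h, ih ht seen]
      refine (List.map_congr_left ?_).symm
      intro k hk
      rcases (pv_mem_keysNot _ _ _).mp hk with ⟨h1, h2, _⟩
      have hne : pvKeyOf p.2 ≠ k := by
        rcases h with h | h
        · intro he; exact h1 (he ▸ h)
        · intro he; exact h2 (he ▸ (pv_contains_iff _ _).mp h)
      unfold pvPick
      rw [pvRep_cons_ne t hne]
    · rw [if_neg h, if_neg h, List.map_cons]
      have hkeep : t.foldl (pvStep (pvKeyOf p.2)) (some p) = some p := by
        refine pv_foldl_keep t _ p ?_
        intro q hq hqk hd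
        rcases hp q hq with h1 | ⟨h1, _⟩
        · exact lt_asymm hd h1
        · exact absurd (h1 ▸ hd) (lt_irrefl _)
      have hhead : pvPick (p :: t) (pvKeyOf p.2) = p := by
        unfold pvPick
        rw [pvRep_cons_eq t rfl, hkeep]
        rfl
      rw [hhead, ih ht (PySem.Set.add seen (pvKeyOf p.2))]
      refine congrArg _ ((List.map_congr_left ?_).symm)
      intro k hk
      rcases (pv_mem_keysNot _ _ _).mp hk with ⟨h1, h2, _⟩
      have hne : pvKeyOf p.2 ≠ k := by
        intro he
        exact h2 (he ▸ (PySem.Set.mem_add _ _ _).mpr (Or.inr rfl))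
      unfold pvPick
      rw [pvRep_cons_ne t hne]

def pvFO : List (List (String × String)) → PySem.Set String → List (List (String × String))
  | [], _ => []
  | s :: t, seen =>
    if pvKeyOf s = "" ∨ PySem.Set.contains seen (pvKeyOf s) then pvFO t seen
    else s :: pvFO t (PySem.Set.add seen (pvKeyOf s))

lemma pvFO_cons (s : List (String × String)) (t : List (List (String × String))) (seen : PySem.Set String) :
    pvFO (s :: t) seen =
      if pvKeyOf s = "" ∨ PySem.Set.contains seen (pvKeyOf s) then pvFO t seen
      else s :: pvFO t (PySem.Set.add seen (pvKeyOf s)) := rfl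

lemma pv_foldlA (l : List (List (String × String))) (acc : List (List (String × String)))
    (seen : PySem.Set String) :
    (l.foldl
      (fun (st : List (List (String × String)) × PySem.Set String) story =>
        let key := pvKeyOf story
        if key = "" ∨ PySem.Set.contains st.2 key then st
        else (st.1 ++ [story], PySem.Set.add st.2 key))
      (acc, seen)).1 = acc ++ pvFO l seen := by
  induction l generalizing acc seen with
  | nil => simp [pvFO]
  | cons s t ih =>
    rw [List.foldl_cons, pvFO_cons]
    by_cases h : pvKeyOf s = "" ∨ PySem.Set.contains seen (pvKeyOf s)
    · rw [if_pos h, if_pos h]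
      exact ih acc seen
    · rw [if_neg h, if_neg h]
      rw [ih (acc ++ [s]) (PySem.Set.add seen (pvKeyOf s)), List.append_assoc]
      rfl

lemma pv_FO_map (l : List pvP) (seen : PySem.Set String) :
    pvFO (l.map (fun p => p.2)) seen = (pvFOD l seen).map (fun p => p.2) := by
  induction l generalizing seen with
  | nil => simp [pvFO, pvFOD]
  | cons p t ih =>
    rw [List.map_cons, pvFO_cons, pvFOD_cons]
    by_cases h : pvKeyOf p.2 = "" ∨ PySem.Set.contains seen (pvKeyOf p.2)
    · rw [if_pos h, if_pos h]; exact ih seen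
    · rw [if_neg h, if_neg h, List.map_cons]
      exact congrArg _ (ih _)

lemma pv_FOD_sublist (l : List pvP) (seen : PySem.Set String) :
    (pvFOD l seen).Sublist l := by
  induction l generalizing seen with
  | nil => simp [pvFOD]
  | cons p t ih =>
    rw [pvFOD_cons]
    by_cases h : pvKeyOf p.2 = "" ∨ PySem.Set.contains seen (pvKeyOf p.2)
    · rw [if_pos h]; exact (ih seen).cons p
    · rw [if_neg h]; exact (ih _).cons₂ p

lemma pv_dict_get (ks : List String) (g : String → pvP) (k : String) :
    (PySem.Dict.mk (ks.map (fun k' => (k', g k')))).get? k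
      = if k ∈ ks then some (g k) else none := by
  induction ks with
  | nil => simp [PySem.Dict.get?]
  | cons k1 t ih =>
    rw [List.map_cons, PySem.Dict.get?_mk_cons]
    by_cases h : k1 = k
    · rw [if_pos (by simp [h]), if_pos (by rw [h]; exact List.mem_cons_self), h]
    · rw [if_neg (by simp [h]), ih]
      by_cases h2 : k ∈ t
      · rw [if_pos h2, if_pos (List.mem_cons_of_mem _ h2)]
      · rw [if_neg h2, if_neg (fun hm => (List.mem_cons.mp hm).elim (fun e => h e.symm) h2)]

lemma pv_dict_contains (ks : List String) (g : String → pvP) (k : String) :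
    (PySem.Dict.mk (ks.map (fun k' => (k', g k')))).contains k = true ↔ k ∈ ks := by
  simp [PySem.Dict.contains, List.any_eq_true]

lemma pv_dict_insert_not_mem (ks : List String) (g : String → pvP) (k : String) (v : pvP)
    (h : k ∉ ks) :
    ((PySem.Dict.mk (ks.map (fun k' => (k', g k')))).insert k v).items
      = ks.map (fun k' => (k', g k')) ++ [(k, v)] := by
  unfold PySem.Dict.insert
  rw [if_neg (fun hc => h ((pv_dict_contains ks g k).mp hc))]

lemma pv_dict_insert_mem (ks : List String) (g : String → pvP) (k : String) (v : pvP)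
    (h : k ∈ ks) :
    ((PySem.Dict.mk (ks.map (fun k' => (k', g k')))).insert k v).items
      = ks.map (fun k' => (k', if k' = k then v else g k')) := by
  unfold PySem.Dict.insert
  rw [if_pos ((pv_dict_contains ks g k).mpr h)]
  show (ks.map (fun k' => (k', g k'))).map (fun p => if p.1 == k then (k, v) else p) = _
  rw [List.map_map]
  refine List.map_congr_left ?_
  intro k' _
  by_cases hk : k' = k
  · simp [hk]
  · simp [hk]

lemma pv_keysNot_append (l : List pvP) (p : pvP) (seen : PySem.Set String) :
    pvKeysNot (l ++ [p]) seen = pvKeysNot l seen ++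
      (if pvKeyOf p.2 = "" ∨ pvKeyOf p.2 ∈ seen ∨ pvKeyOf p.2 ∈ pvKeysNot l seen then []
       else [pvKeyOf p.2]) := by
  induction l generalizing seen with
  | nil =>
    rw [List.nil_append, pvKeysNot_cons]
    show _ = [] ++ _
    rw [List.nil_append]
    by_cases h : pvKeyOf p.2 = "" ∨ PySem.Set.contains seen (pvKeyOf p.2)
    · rw [if_pos h, if_pos ?_]
      · rfl
      · rcases h with h | h
        · exact Or.inl h
        · exact Or.inr (Or.inl ((pv_contains_iff _ _).mp h))
    · rw [if_neg h, if_neg ?_]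
      · rfl
      · rintro (h1 | h1 | h1)
        · exact h (Or.inl h1)
        · exact h (Or.inr ((pv_contains_iff _ _).mpr h1))
        · simp [pvKeysNot] at h1
  | cons q t ih =>
    rw [List.cons_append, pvKeysNot_cons, pvKeysNot_cons]
    by_cases h : pvKeyOf q.2 = "" ∨ PySem.Set.contains seen (pvKeyOf q.2)
    · rw [if_pos h, if_pos h, ih seen]
    · rw [if_neg h, if_neg h, ih (PySem.Set.add seen (pvKeyOf q.2)), List.cons_append]
      refine congrArg _ (congrArg _ ?_)
      refine if_congr ?_ rfl rfl
      constructor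
      · rintro (h1 | h1 | h1)
        · exact Or.inl h1
        · rcases (PySem.Set.mem_add _ _ _).mp h1 with h2 | h2
          · exact Or.inr (Or.inl h2)
          · exact Or.inr (Or.inr (List.mem_cons.mpr (Or.inl h2)))
        · exact Or.inr (Or.inr (List.mem_cons_of_mem _ h1))
      · rintro (h1 | h1 | h1)
        · exact Or.inl h1
        · exact Or.inr (Or.inl ((PySem.Set.mem_add _ _ _).mpr (Or.inl h1)))
        · rcases List.mem_cons.mp h1 with h2 | h2
          · exact Or.inr (Or.inl ((PySem.Set.mem_add _ _ _).mpr (Or.inr h2)))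
          · exact Or.inr (Or.inr h2)

lemma pv_rep_some_of_mem {l : List pvP} {k : String}
    (h : k ∈ pvKeysNot l PySem.Set.empty) : pvRep l k = some (pvPick l k) := by
  rcases (pv_mem_keysNot _ _ _).mp h with ⟨h1, _, q, hq, hqk⟩
  cases hc : pvRep l k with
  | none => exact absurd hqk ((pvRep_eq_none_iff l k).mp hc q hq)
  | some c => unfold pvPick; rw [hc]; rfl

lemma pv_rep_none_of_not_mem {l : List pvP} {k : String} (hk : k ≠ "")
    (h : k ∉ pvKeysNot l PySem.Set.empty) : pvRep l k = none := by
  rw [pvRep_eq_none_iff]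
  intro q hq hqk
  exact h ((pv_mem_keysNot _ _ _).mpr ⟨hk, by simp [PySem.Set.empty], q, hq, hqk⟩)

lemma pvPick_append_ne {p : pvP} {k : String} (l : List pvP) (hne : pvKeyOf p.2 ≠ k) :
    pvPick (l ++ [p]) k = pvPick l k := by
  unfold pvPick
  rw [pvRep_append, show pvStep k (pvRep l k) p = pvRep l k by simp only [pvStep, if_neg hne]]

def pvStepB (best : PySem.Dict String (Int × List (String × String))) (p : pvP) :
    PySem.Dict String (Int × List (String × String)) :=
  let key := pvKeyOf p.2
  if key = "" then best
  else
    match best.get? key with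
    | none => best.insert key p
    | some cur => if pvDateOf cur.2 < pvDateOf p.2 then best.insert key p else best

lemma pvStepB_blank {d : PySem.Dict String (Int × List (String × String))} {p : pvP}
    (h : pvKeyOf p.2 = "") : pvStepB d p = d := by
  simp only [pvStepB, if_pos h]

lemma pvStepB_new {d : PySem.Dict String (Int × List (String × String))} {p : pvP}
    (hk : pvKeyOf p.2 ≠ "") (hg : d.get? (pvKeyOf p.2) = none) :
    pvStepB d p = d.insert (pvKeyOf p.2) p := by
  simp only [pvStepB, if_neg hk, hg]

lemma pvStepB_lt {d : PySem.Dict String (Int × List (String × String))} {p c : pvP}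
    (hk : pvKeyOf p.2 ≠ "") (hg : d.get? (pvKeyOf p.2) = some c)
    (hd : pvDateOf c.2 < pvDateOf p.2) :
    pvStepB d p = d.insert (pvKeyOf p.2) p := by
  simp only [pvStepB, if_neg hk, hg]
  rw [if_pos hd]

lemma pvStepB_ge {d : PySem.Dict String (Int × List (String × String))} {p c : pvP}
    (hk : pvKeyOf p.2 ≠ "") (hg : d.get? (pvKeyOf p.2) = some c)
    (hd : ¬ pvDateOf c.2 < pvDateOf p.2) :
    pvStepB d p = d := by
  simp only [pvStepB, if_neg hk, hg]
  rw [if_neg hd]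

lemma pv_dict_fold (l : List pvP) :
    (l.foldl
      (fun (best : PySem.Dict String (Int × List (String × String))) p =>
        let key := pvKeyOf p.2
        if key = "" then best
        else
          match best.get? key with
          | none => best.insert key p
          | some cur => if pvDateOf cur.2 < pvDateOf p.2 then best.insert key p else best)
      PySem.Dict.empty).items
      = (pvKeysNot l PySem.Set.empty).map (fun k => (k, pvPick l k)) := by
  show (l.foldl pvStepB PySem.Dict.empty).items = _
  induction l using List.reverseRecOn with
  | nil => rfl
  | append_singleton l p ih =>
    rw [List.foldl_append, List.foldl_cons, List.foldl_nil]
    have hD : l.foldl pvStepB PySem.Dict.empty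
        = PySem.Dict.mk ((pvKeysNot l PySem.Set.empty).map (fun k => (k, pvPick l k))) := by
      apply PySem.Dict.ext
      rw [ih]
    rw [hD, pv_keysNot_append]
    by_cases hk0 : pvKeyOf p.2 = ""
    · rw [pvStepB_blank hk0, if_pos (Or.inl hk0), List.append_nil]
      refine (List.map_congr_left ?_).symm
      intro k hk
      rcases (pv_mem_keysNot _ _ _).mp hk with ⟨h1, _, _⟩
      rw [pvPick_append_ne (p := p) (k := k) l (fun he => h1 (he ▸ hk0))]
    · by_cases hmem : pvKeyOf p.2 ∈ pvKeysNot l PySem.Set.empty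
      · have hrep := pv_rep_some_of_mem hmem
        have hget : (PySem.Dict.mk ((pvKeysNot l PySem.Set.empty).map (fun k => (k, pvPick l k)))).get?
            (pvKeyOf p.2) = some (pvPick l (pvKeyOf p.2)) := by
          rw [pv_dict_get, if_pos hmem]
        rw [if_pos (Or.inr (Or.inr hmem)), List.append_nil]
        by_cases hd : pvDateOf (pvPick l (pvKeyOf p.2)).2 < pvDateOf p.2
        · rw [pvStepB_lt hk0 hget hd, pv_dict_insert_mem _ _ _ _ hmem]
          refine (List.map_congr_left ?_).symm
          intro k hk
          by_cases hkk : k = pvKeyOf p.2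
          · rw [if_pos hkk]
            have : pvPick (l ++ [p]) k = p := by
              unfold pvPick
              rw [pvRep_append, hkk, hrep,
                show pvStep (pvKeyOf p.2) (some (pvPick l (pvKeyOf p.2))) p = some p by
                  simp [pvStep, hd]]
              rfl
            rw [this]
          · rw [if_neg hkk, pvPick_append_ne l (fun he => hkk he.symm)]
        · rw [pvStepB_ge hk0 hget hd]
          refine (List.map_congr_left ?_).symm
          intro k hk
          by_cases hkk : k = pvKeyOf p.2
          · have : pvPick (l ++ [p]) k = pvPick l k := by
              unfold pvPick
              rw [pvRep_append, hkk, hrep,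
                show pvStep (pvKeyOf p.2) (some (pvPick l (pvKeyOf p.2))) p
                    = some (pvPick l (pvKeyOf p.2)) by
                  simp [pvStep, hd], ← hkk]
            rw [this]
          · rw [pvPick_append_ne l (fun he => hkk he.symm)]
      · have hget : (PySem.Dict.mk ((pvKeysNot l PySem.Set.empty).map (fun k => (k, pvPick l k)))).get?
            (pvKeyOf p.2) = none := by
          rw [pv_dict_get, if_neg hmem]
        rw [pvStepB_new hk0 hget, pv_dict_insert_not_mem _ _ _ _ hmem,
          if_neg (by rintro (h | h | h)
                     · exact hk0 h
                     · simp [PySem.Set.empty] at h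
                     · exact hmem h), List.map_append]
        refine congrArg₂ _ ?_ ?_
        · refine (List.map_congr_left ?_).symm
          intro k hk
          rw [pvPick_append_ne l (fun he => hmem (he ▸ hk))]
        · rw [List.map_cons, List.map_nil]
          have : pvPick (l ++ [p]) (pvKeyOf p.2) = p := by
            unfold pvPick
            rw [pvRep_append, pv_rep_none_of_not_mem hk0 hmem,
              show pvStep (pvKeyOf p.2) none p = some p by simp [pvStep]]
            rfl
          rw [this]

lemma pv_enum_pairwise (stories : List (List (String × String))) :
    (PySem.List.enumerate stories).Pairwise (fun a b : pvP => a.1 < b.1) := by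
  have h := PySem.List.pairwise_lt_pyRange_one 0 (0 + (stories.length : Int))
  rw [← PySem.List.map_fst_enumerate stories 0] at h
  exact (List.pairwise_map.mp h)

lemma pv_enum_nodup_fst (stories : List (List (String × String))) :
    ((PySem.List.enumerate stories).map (fun p : pvP => p.1)).Nodup := by
  rw [PySem.List.map_fst_enumerate stories 0]
  exact PySem.List.nodup_pyRange_one _ _

lemma pv_enum_inj {stories : List (List (String × String))} {a b : pvP}
    (ha : a ∈ PySem.List.enumerate stories) (hb : b ∈ PySem.List.enumerate stories)
    (h : a.1 = b.1) : a = b := by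
  have hn := pv_enum_nodup_fst stories
  rw [List.nodup_map_iff_inj_on (by
    have := hn
    exact (List.Nodup.of_map _ this))] at hn
  exact hn a ha b hb h

lemma pv_HT_lt : ∀ a b : pvP, a.1 < b.1 → pvDateOf a.2 = pvDateOf b.2 → a.1 < b.1 :=
  fun _ _ h _ => h

lemma pv_HT_S : ∀ a b : pvP, pvS a b → pvDateOf a.2 = pvDateOf b.2 → a.1 < b.1 := by
  intro a b hS heq
  rcases hS with h | ⟨_, h⟩
  · exact absurd h (by rw [heq]; exact lt_irrefl _)
  · exact h

theorem pv_main (stories : List (List (String × String))) :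
    (((PySem.List.sorted stories (fun x => pvDateOf x) true).foldl
      (fun (st : List (List (String × String)) × PySem.Set String) story =>
        let key := pvKeyOf story
        if key = "" ∨ PySem.Set.contains st.2 key then st
        else (st.1 ++ [story], PySem.Set.add st.2 key))
      ([], PySem.Set.empty)).1)
    =
    (PySem.List.sorted
      (PySem.List.sorted
        (((PySem.List.enumerate stories).foldl
          (fun (best : PySem.Dict String (Int × List (String × String))) p =>
            let key := pvKeyOf p.2
            if key = "" then best
            else
              match best.get? key with
              | none => best.insert key p
              | some cur => if pvDateOf cur.2 < pvDateOf p.2 then best.insert key p else best)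
          PySem.Dict.empty).values)
        (fun t => t.1))
      (fun t => pvDateOf t.2) true).map (fun t => t.2) := by
  -- names
  set E := PySem.List.enumerate stories with hE
  have hEpw : E.Pairwise (fun a b : pvP => a.1 < b.1) := pv_enum_pairwise stories
  set SD' := PySem.List.sorted E (fun t : pvP => pvDateOf t.2) true with hSD'
  -- A side
  rw [pv_foldlA, List.nil_append]
  have hmap : PySem.List.sorted stories (fun x => pvDateOf x) true = SD'.map (fun p : pvP => p.2) := by
    rw [hSD', pv_map_sorted_rev (fun p : pvP => p.2) (fun s => pvDateOf s) E]
    rw [show E.map (fun p : pvP => p.2) = stories from PySem.List.map_snd_enumerate stories 0]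
  rw [hmap, pv_FO_map]
  -- B side values
  have hvals : (((E.foldl
          (fun (best : PySem.Dict String (Int × List (String × String))) p =>
            let key := pvKeyOf p.2
            if key = "" then best
            else
              match best.get? key with
              | none => best.insert key p
              | some cur => if pvDateOf cur.2 < pvDateOf p.2 then best.insert key p else best)
          PySem.Dict.empty).values))
      = (pvKeysNot E PySem.Set.empty).map (pvPick E) := by
    show (PySem.Dict.values _) = _
    unfold PySem.Dict.values
    rw [pv_dict_fold E, List.map_map]
    rfl
  rw [hvals]
  -- orders
  have hSD'pw : SD'.Pairwise pvS := by
    rw [hSD']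
    exact pv_sorted_rev_pairwise (fun t : pvP => pvDateOf t.2) (fun a b : pvP => a.1 < b.1) E hEpw
  have hLpw : (pvFOD SD' PySem.Set.empty).Pairwise pvS :=
    (hSD'pw.sublist (pv_FOD_sublist SD' PySem.Set.empty))
  -- inner sort pairwise
  set inner := PySem.List.sorted ((pvKeysNot E PySem.Set.empty).map (pvPick E)) (fun t : pvP => t.1) with hinner
  have hvals_nodup : (((pvKeysNot E PySem.Set.empty).map (pvPick E)).map (fun t : pvP => t.1)).Nodup := by
    rw [List.map_map]
    rw [List.nodup_map_iff_inj_on (pv_nodup_keysNot E PySem.Set.empty)]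
    intro x hx y hy hxy
    have hbx := pvRep_isBest (fun a b : pvP => a.1 < b.1) pv_HT_lt hEpw (pv_rep_some_of_mem hx)
    have hby := pvRep_isBest (fun a b : pvP => a.1 < b.1) pv_HT_lt hEpw (pv_rep_some_of_mem hy)
    have := pv_enum_inj hbx.1 hby.1 hxy
    rw [← hbx.2.1, ← hby.2.1, this]
  have hinner_perm : inner.Perm ((pvKeysNot E PySem.Set.empty).map (pvPick E)) :=
    PySem.List.sorted_perm _ _ _
  have hinner_pw : inner.Pairwise (fun a b : pvP => a.1 < b.1) := by
    have h1 : inner.Pairwise (fun a b : pvP => a.1 ≤ b.1) :=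
      PySem.List.sorted_pairwise _ _
    have h2 : (inner.map (fun t : pvP => t.1)).Nodup :=
      ((hinner_perm.map (fun t : pvP => t.1)).nodup_iff).mpr hvals_nodup
    have h3 : inner.Pairwise (fun a b : pvP => a.1 ≠ b.1) := List.pairwise_map.mp h2
    exact (h1.and h3).imp (fun h => lt_of_le_of_ne h.1 h.2)
  have hRpw : (PySem.List.sorted inner (fun t : pvP => pvDateOf t.2) true).Pairwise pvS :=
    pv_sorted_rev_pairwise (fun t : pvP => pvDateOf t.2) (fun a b : pvP => a.1 < b.1) inner hinner_pw
  -- permutation between the two deduped lists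
  have hperm : (pvFOD SD' PySem.Set.empty).Perm
      (PySem.List.sorted inner (fun t : pvP => pvDateOf t.2) true) := by
    have hSDE : SD'.Perm E := PySem.List.sorted_perm _ _ _
    have hpoint : ∀ k ∈ pvKeysNot SD' PySem.Set.empty, pvPick SD' k = pvPick E k := by
      intro k hk
      have hb1 := pvRep_isBest pvS pv_HT_S hSD'pw (pv_rep_some_of_mem hk)
      have hkE : k ∈ pvKeysNot E PySem.Set.empty := by
        rcases (pv_mem_keysNot _ _ _).mp hk with ⟨h1, h2, q, hq, hq'⟩
        exact (pv_mem_keysNot _ _ _).mpr ⟨h1, h2, q, hSDE.mem_iff.mp hq, hq'⟩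
      have hb2 := pvRep_isBest (fun a b : pvP => a.1 < b.1) pv_HT_lt hEpw (pv_rep_some_of_mem hkE)
      exact pvIsBest_unique (pvIsBest_perm hb1 hSDE) hb2
    have hkeysperm : (pvKeysNot SD' PySem.Set.empty).Perm (pvKeysNot E PySem.Set.empty) := by
      rw [List.perm_ext_iff_of_nodup (pv_nodup_keysNot _ _) (pv_nodup_keysNot _ _)]
      intro k
      rw [pv_mem_keysNot, pv_mem_keysNot]
      constructor
      · rintro ⟨h1, h2, q, hq, hq'⟩
        exact ⟨h1, h2, q, hSDE.mem_iff.mp hq, hq'⟩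
      · rintro ⟨h1, h2, q, hq, hq'⟩
        exact ⟨h1, h2, q, hSDE.mem_iff.mpr hq, hq'⟩
    rw [pv_FOD_eq SD' hSD'pw PySem.Set.empty, List.map_congr_left hpoint]
    exact (hkeysperm.map _).trans ((PySem.List.sorted_perm _ _ _).trans hinner_perm).symm
  -- conclude
  have heq : pvFOD SD' PySem.Set.empty
      = PySem.List.sorted inner (fun t : pvP => pvDateOf t.2) true := by
    refine List.Perm.eq_of_pairwise ?_ hLpw hRpw hperm
    intro a b _ _ h1 h2
    exact absurd h1 (fun h1 => pvS_asymm h1 h2)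
  rw [heq]

-- ===== VERDICT (by name: the statement is the Claim_ definition above) =====
theorem dedupe_stories_py_spec : Claim_equal_dedupe_stories_py := by
  intro stories _
  show dedupe_stories_py stories = dedupe_stories_py_alt stories
  unfold dedupe_stories_py dedupe_stories_py_alt
  exact pv_main stories
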